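-- pv_equiv track=rewrite | github.com/DiamondLightSource/Savu | savu/data/data_structures/preview.py | _add_preview_defaults
-- ===== SOURCE A (Python) =====
-- def _add_preview_defaults(plist):
--     """ Fill in missing values in preview list entries.
--
--     :param: preview list with entries of the form
--         ``start[:stop:step:chunk]``
--     :returns: preview list with missing values replaced by defaults
--     :rtype: list
--     """
--     nEntries = 4
--     #plist = [str(i) for i in plist] if isinstance(plist[0], int) else plist
--     plist = [str(i) if isinstance(i, int) else i for i in plist]
--     diff_len = [(nEntries - len(elem.split(':'))) for elem in plist]
--     diff3 = [i for i in range(len(diff_len)) if diff_len[i] == 3]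
--     for dim in diff3:
--         plist[dim] = plist[dim] + ':' + plist[dim] + '+1'
--         diff_len[dim] = 2
--
--     all_idx = [i for i in range(len(plist)) if plist[i] == ':']
--     amend = [i for i in range(len(plist)) if diff_len and i not in all_idx]
--     for idx in amend:
--         plist[idx] += ':1'*diff_len[idx]
--     return plist
-- ===== SOURCE B (Python) =====
-- def _add_preview_defaults(plist):
--     """Fill in missing values in preview list entries (single pass)."""
--     out = []
--     for elem in plist:
--         elem = str(elem) if isinstance(elem, int) else elem
--         if elem == ':':
--             out.append(elem)
--             continue
--         diff = 4 - len(elem.split(':'))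
--         if diff == 3:
--             elem = elem + ':' + elem + '+1'
--             diff = 2
--         out.append(elem + ':1' * diff)
--     return out
-- ===== Notes on version B (the rewrite author's own statement) =====
-- stated objective: simpler
-- what changed: One pass over the entries building the result directly, instead of constructing intermediate index lists (diff_len/diff3/all_idx/amend) and mutating the list twice.
import Mathlib
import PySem

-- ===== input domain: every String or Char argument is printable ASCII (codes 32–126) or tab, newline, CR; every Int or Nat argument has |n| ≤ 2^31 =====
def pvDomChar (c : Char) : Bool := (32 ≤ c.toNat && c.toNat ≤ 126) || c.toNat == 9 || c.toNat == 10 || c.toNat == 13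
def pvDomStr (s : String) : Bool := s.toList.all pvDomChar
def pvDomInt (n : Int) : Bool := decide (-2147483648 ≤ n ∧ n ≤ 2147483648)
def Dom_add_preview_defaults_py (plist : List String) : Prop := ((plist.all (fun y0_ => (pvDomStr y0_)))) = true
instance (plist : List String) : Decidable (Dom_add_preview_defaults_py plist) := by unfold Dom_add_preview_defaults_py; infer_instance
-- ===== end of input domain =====

-- B is a single loop over the entries building a fresh result list, replacing A's
-- intermediate index lists (diff_len/diff3/all_idx/amend) and two in-place mutation passes.

-- ':1' * n  (Python string repetition; '' for n ≤ 0), used by both ports for the same construct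
def strRepeat (s : String) (n : Int) : String := String.ofList (PySem.List.pyRepeat s.toList n)

-- ===== PORT A =====
def add_preview_defaults_py (plist : List String) : List String :=
  -- nEntries = 4;  the isinstance(int) coercion is identity on a list of strings
  let plist1 := plist.map (fun i => i)
  -- elem.split(':') : sep is nonempty, so split? always returns a value
  let diff_len : List Int := plist1.map
    (fun elem => (4 : Int) - ((PySem.Str.split? elem ":").getD []).length)
  let diff3 := (List.range diff_len.length).filter (fun i => diff_len.getD i 0 == 3)
  let st := diff3.foldl (fun (st : List String × List Int) dim =>
      (st.1.set dim (st.1.getD dim "" ++ ":" ++ st.1.getD dim "" ++ "+1"), st.2.set dim 2))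
    (plist1, diff_len)
  let plist2 := st.1
  let diff_len2 := st.2
  let all_idx := (List.range plist2.length).filter (fun i => plist2.getD i "" == ":")
  let amend := (List.range plist2.length).filter
    (fun i => !diff_len2.isEmpty && !(all_idx.contains i))
  amend.foldl (fun p idx => p.set idx (p.getD idx "" ++ strRepeat ":1" (diff_len2.getD idx 0))) plist2

-- ===== PORT B =====
def add_preview_defaults_py_alt (plist : List String) : List String :=
  plist.map (fun elem =>
    if elem == ":" then elem
    else
      let diff : Int := 4 - ((PySem.Str.split? elem ":").getD []).length
      if diff == 3 then (elem ++ ":" ++ elem ++ "+1") ++ strRepeat ":1" 2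
      else elem ++ strRepeat ":1" diff)

-- ===== PRECONDITION & SPEC =====
def Spec_add_preview_defaults_py (plist : List String) (out : List String) : Prop := out = add_preview_defaults_py_alt plist
instance (plist : List String) (out : List String) : Decidable (Spec_add_preview_defaults_py plist out) := by unfold Spec_add_preview_defaults_py; infer_instance

-- ===== CLAIM (what is proved, stated in full; the proofs are below) =====
def Claim_equal_add_preview_defaults_py : Prop := ∀ (plist : List String), Dom_add_preview_defaults_py plist → Spec_add_preview_defaults_py plist (add_preview_defaults_py plist)

-- ===== LEMMAS AND PROOFS =====

-- a fold of independent per-index updates over a duplicate-free index list is a mapIdx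
theorem foldl_set_indep {α : Type} (g : Nat → α → α) (d0 : α) :
    ∀ (I : List Nat) (q : List α), I.Nodup → (∀ i ∈ I, i < q.length) →
      I.foldl (fun acc i => acc.set i (g i (acc.getD i d0))) q
        = q.mapIdx (fun j x => if j ∈ I then g j x else x) := by
  intro I
  induction I with
  | nil =>
      intro q _ _
      simp only [List.foldl_nil, List.mem_nil_iff, if_neg (fun h => h)]
      apply List.ext_getElem <;> simp
  | cons i I' ih =>
      intro q hnd hlt
      have hi : i < q.length := hlt i (by simp)
      have hiI' : i ∉ I' := (List.nodup_cons.mp hnd).1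
      have hI' : ∀ j ∈ I', j < (q.set i (g i (q.getD i d0))).length := by
        intro j hj; simpa using hlt j (by simp [hj])
      rw [List.foldl_cons, ih _ (List.nodup_cons.mp hnd).2 hI']
      apply List.ext_getElem
      · simp
      · intro j h1 h2
        have hj : j < q.length := by simpa using h1
        simp only [List.getElem_mapIdx, List.getD_eq_getElem _ _ hi]
        by_cases hji : j = i
        · subst hji
          simp [List.getElem_set_self, hiI']
        · simp [List.getElem_set_ne (Ne.symm hji), hji]

-- the simultaneous pair fold splits into two independent folds
theorem pair_fold_split (I : List Nat) (p : List String) (d : List Int) :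
    I.foldl (fun (st : List String × List Int) dim =>
        (st.1.set dim (st.1.getD dim "" ++ ":" ++ st.1.getD dim "" ++ "+1"), st.2.set dim 2))
      (p, d)
    = (I.foldl (fun a dim => a.set dim (a.getD dim "" ++ ":" ++ a.getD dim "" ++ "+1")) p,
       I.foldl (fun a dim => a.set dim 2) d) := by
  induction I generalizing p d with
  | nil => rfl
  | cons i I' ih => simp only [List.foldl_cons]; exact ih _ _

theorem expand_ne_colon (e : String) : (e ++ ":" ++ e ++ "+1") ≠ ":" := by
  intro h
  have h2 := congrArg (fun s => s.toList.length) h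
  simp [String.toList_append] at h2
  omega

-- ===== VERDICT (by name: the statement is the Claim_ definition above) =====
theorem add_preview_defaults_py_spec : Claim_equal_add_preview_defaults_py := by
  intro plist _
  unfold Spec_add_preview_defaults_py add_preview_defaults_py add_preview_defaults_py_alt
  simp only [List.map_id']
  set dl : List Int := plist.map
    (fun elem => (4 : Int) - ((PySem.Str.split? elem ":").getD []).length) with hdl
  have hdlen : dl.length = plist.length := by simp [hdl]
  set diff3 := (List.range dl.length).filter (fun i => dl.getD i 0 == 3) with hdiff3
  have hnd3 : diff3.Nodup := List.Nodup.filter _ (List.nodup_range)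
  have hlt3 : ∀ i ∈ diff3, i < plist.length := by
    intro i hi
    have := List.mem_range.mp (List.mem_filter.mp hi).1
    omega
  rw [pair_fold_split]
  rw [foldl_set_indep (fun _ x => x ++ ":" ++ x ++ "+1") "" diff3 plist hnd3 hlt3]
  rw [foldl_set_indep (fun _ _ => (2 : Int)) 0 diff3 dl hnd3
        (by intro i hi; have := hlt3 i hi; omega)]
  set p2 := plist.mapIdx (fun j x => if j ∈ diff3 then x ++ ":" ++ x ++ "+1" else x) with hp2
  set d2 := dl.mapIdx (fun j x => if j ∈ diff3 then (2 : Int) else x) with hd2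
  have hp2len : p2.length = plist.length := by simp [hp2]
  have hd2len : d2.length = plist.length := by simp [hd2, hdlen]
  set all_idx := (List.range p2.length).filter (fun i => p2.getD i "" == ":") with hall
  set amend := (List.range p2.length).filter (fun i => !d2.isEmpty && !(all_idx.contains i)) with hamend
  have hnda : amend.Nodup := List.Nodup.filter _ (List.nodup_range)
  have hlta : ∀ i ∈ amend, i < p2.length := by
    intro i hi
    exact List.mem_range.mp (List.mem_filter.mp hi).1
  rw [foldl_set_indep (fun i x => x ++ strRepeat ":1" (d2.getD i 0)) "" amend p2 hnda hlta]
  apply List.ext_getElem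
  · simp [hp2len]
  · intro j h1 h2
    have hjp : j < plist.length := by simpa [hp2len] using h1
    have hjd : j < dl.length := by omega
    have hj2 : j < p2.length := by omega
    have hdlj : dl.getD j 0 = (4 : Int) - ((PySem.Str.split? plist[j] ":").getD []).length := by
      rw [List.getD_eq_getElem _ _ hjd]; simp [hdl]
    have hmem3 : (j ∈ diff3) ↔
        ((4 : Int) - ((PySem.Str.split? plist[j] ":").getD []).length == 3) = true := by
      rw [hdiff3]
      simp only [List.mem_filter, List.mem_range, hdlj]
      constructor
      · exact fun h => h.2
      · exact fun h => ⟨hjd, h⟩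
    have hp2j : p2[j]'hj2 =
        (if j ∈ diff3 then plist[j] ++ ":" ++ plist[j] ++ "+1" else plist[j]) := by
      simp [hp2]
    have hd2j : d2.getD j 0 = (if j ∈ diff3 then (2 : Int)
        else (4 : Int) - ((PySem.Str.split? plist[j] ":").getD []).length) := by
      rw [List.getD_eq_getElem _ _ (by omega)]
      simp only [hd2, List.getElem_mapIdx]
      rw [← hdlj, List.getD_eq_getElem _ _ hjd]
    have hd2ne : d2.isEmpty = false := by
      have hne : d2 ≠ [] := by
        intro h; rw [h] at hd2len; simp at hd2len; omega
      simpa using hne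
    have hgd : p2.getD j "" = p2[j]'hj2 := List.getD_eq_getElem _ _ hj2
    have hallj : (j ∈ all_idx) ↔ p2[j]'hj2 = ":" := by
      rw [hall, List.mem_filter, List.mem_range, hgd]
      simp [hj2]
    have hmema : (j ∈ amend) ↔ ¬ (p2[j]'hj2 = ":") := by
      rw [hamend, List.mem_filter, List.mem_range]
      simp [hj2, hd2ne, hallj]
    simp only [List.getElem_mapIdx, List.getElem_map]
    by_cases hc : plist[j] = ":"
    · have h3 : ¬ (j ∈ diff3) := by
        rw [hmem3, hc]
        simp [PySem.Str.split?]
        decide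
      have hna : ¬ (j ∈ amend) := by rw [hmema, hp2j, if_neg h3]; simp [hc]
      simp [hna, hp2j, h3, hc]
    · by_cases h3 : j ∈ diff3
      · have hne : p2[j]'hj2 ≠ ":" := by
          rw [hp2j, if_pos h3]; exact expand_ne_colon _
        have ha : j ∈ amend := hmema.mpr hne
        have hq := hmem3.mp h3
        simp only [ha, if_pos, hp2j, if_pos h3, hd2j]
        simp [hc, hq]
      · have hne : p2[j]'hj2 ≠ ":" := by rw [hp2j, if_neg h3]; exact hc
        have ha : j ∈ amend := hmema.mpr hne
        have hq : ((4 : Int) - ((PySem.Str.split? plist[j] ":").getD []).length == 3) = false := by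
          rw [← Bool.not_eq_true]; exact fun h => h3 (hmem3.mpr h)
        simp only [ha, if_pos, hp2j, if_neg h3, hd2j]
        simp [hc, hq]
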